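-- pv_equiv track=rewrite | github.com/percywk/past-projects | traveling_rewrite.py | check_if_in_bad_circuits
-- ===== SOURCE A (Python) =====
-- def check_if_in_bad_circuits(potential_visited, bad_circuits):
-- 	found = False
--
-- 	for grouping in bad_circuits:
--
-- 		if abs(len(grouping) - len(potential_visited)) > 2:
-- 			continue
--
-- 		counter = 0
-- 		for index, node_id in enumerate(grouping):
-- 			if index == len(potential_visited):
-- 				break
--
-- 			if potential_visited[index] == node_id:
-- 				counter += 1
-- 			else:
-- 				break
--
-- 		if counter == len(grouping):
-- 			found = True
-- 			break
--
-- 	return found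
-- ===== SOURCE B (Python) =====
-- def check_if_in_bad_circuits(potential_visited, bad_circuits):
--     L = len(potential_visited)
--     prefixes = {tuple(potential_visited[:l]) for l in (L, L - 1, L - 2) if l >= 0}
--     bad = {tuple(g) for g in bad_circuits}
--     return any(p in bad for p in prefixes)
-- ===== Notes on version B (the rewrite author's own statement) =====
-- stated objective: alternative
-- what changed: Instead of scanning every bad circuit element-by-element against the path, B computes the at most three legal prefixes of the path (lengths L, L-1, L-2) once and tests set membership against the set of bad circuits.
import Mathlib
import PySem

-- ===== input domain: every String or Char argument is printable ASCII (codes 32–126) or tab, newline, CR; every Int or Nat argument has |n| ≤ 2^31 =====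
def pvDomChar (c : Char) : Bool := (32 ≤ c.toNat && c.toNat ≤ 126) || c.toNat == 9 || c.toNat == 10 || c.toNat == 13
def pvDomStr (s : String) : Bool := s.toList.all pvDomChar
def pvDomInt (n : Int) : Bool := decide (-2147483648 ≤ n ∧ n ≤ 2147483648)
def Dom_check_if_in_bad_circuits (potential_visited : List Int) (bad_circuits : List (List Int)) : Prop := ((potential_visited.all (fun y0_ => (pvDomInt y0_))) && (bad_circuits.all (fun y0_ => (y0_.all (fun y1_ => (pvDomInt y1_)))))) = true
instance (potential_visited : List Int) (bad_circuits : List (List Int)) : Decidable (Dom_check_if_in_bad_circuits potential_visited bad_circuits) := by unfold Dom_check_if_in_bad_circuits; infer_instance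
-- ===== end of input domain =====

-- B replaces A's per-circuit element-by-element prefix scan by computing the at most
-- three legal prefixes of the path once and testing set membership (objective: alternative).

-- ===== PORT A =====
-- inner loop: 'for index, node_id in enumerate(grouping): …' with its two breaks,
-- carrying the index and the counter exactly as the Python does
def pvInnerA (pv : List Int) (g : List Int) (index : Nat) (counter : Nat) : Nat :=
  match g with
  | [] => counter
  | node_id :: rest =>
    if index = pv.length then counter
    else if PySem.List.pyGetD pv (index : Int) 0 = node_id then
      pvInnerA pv rest (index + 1) (counter + 1)
    else counter

-- outer loop: 'for grouping in bad_circuits: …' with continue and break-on-found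
def pvOuterA (pv : List Int) (bads : List (List Int)) : Bool :=
  match bads with
  | [] => false
  | grouping :: rest =>
    if ((grouping.length : Int) - (pv.length : Int)).natAbs > 2 then pvOuterA pv rest
    else if pvInnerA pv grouping 0 0 = grouping.length then true
    else pvOuterA pv rest

def check_if_in_bad_circuits (potential_visited : List Int) (bad_circuits : List (List Int)) : Bool :=
  pvOuterA potential_visited bad_circuits

-- ===== PORT B =====
def check_if_in_bad_circuits_alt (potential_visited : List Int) (bad_circuits : List (List Int)) : Bool :=
  let L : Int := potential_visited.length
  let prefixes : PySem.Set (List Int) :=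
    PySem.Set.ofList (([L, L - 1, L - 2].filter (fun l => decide (0 ≤ l))).map
      (fun l => PySem.List.slice potential_visited none (some l)))
  let bad : PySem.Set (List Int) := PySem.Set.ofList bad_circuits
  prefixes.any (fun p => PySem.Set.contains bad p)

-- ===== PRECONDITION & SPEC =====
def Spec_check_if_in_bad_circuits (potential_visited : List Int) (bad_circuits : List (List Int)) (out : Bool) : Prop := out = check_if_in_bad_circuits_alt potential_visited bad_circuits
instance (potential_visited : List Int) (bad_circuits : List (List Int)) (out : Bool) : Decidable (Spec_check_if_in_bad_circuits potential_visited bad_circuits out) := by unfold Spec_check_if_in_bad_circuits; infer_instance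

-- ===== CLAIM (what is proved, stated in full; the proofs are below) =====
def Claim_equal_check_if_in_bad_circuits : Prop := ∀ (potential_visited : List Int) (bad_circuits : List (List Int)), Dom_check_if_in_bad_circuits potential_visited bad_circuits → Spec_check_if_in_bad_circuits potential_visited bad_circuits (check_if_in_bad_circuits potential_visited bad_circuits)

-- ===== LEMMAS AND PROOFS =====

-- both programs decide the same predicate: some bad circuit is a prefix of the
-- path that is at most two nodes shorter than it
def pvGood (pv : List Int) (g : List Int) : Bool :=
  decide (g <+: pv) && decide (pv.length ≤ g.length + 2)

theorem pvInnerA_prefix (g : List Int) : ∀ (pre suf : List Int) (c : Nat),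
    (pvInnerA (pre ++ suf) g pre.length c = c + g.length ↔ g <+: suf) := by
  induction g with
  | nil =>
    intro pre suf c
    simp [pvInnerA]
  | cons x rest ih =>
    intro pre suf c
    cases suf with
    | nil =>
      rw [show pvInnerA (pre ++ []) (x :: rest) pre.length c = c from by
        simp [pvInnerA]]
      constructor
      · intro h; simp only [List.length_cons] at h; omega
      · intro h; exact absurd h (by simp)
    | cons s suf' =>
      have hlen : pre.length ≠ (pre ++ s :: suf').length := by simp
      have hget : PySem.List.pyGetD (pre ++ s :: suf') (pre.length : Int) 0 = s := by
        simp [PySem.List.pyGetD_natCast, List.getD]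
      simp only [pvInnerA, if_neg hlen, hget]
      by_cases hx : s = x
      · subst hx
        have hre : pre ++ s :: suf' = (pre ++ [s]) ++ suf' := by simp
        have hln : pre.length + 1 = (pre ++ [s]).length := by simp
        rw [if_pos rfl, hre, hln, List.length_cons,
          show c + (rest.length + 1) = (c + 1) + rest.length from by omega,
          ih (pre ++ [s]) suf' (c + 1)]
        exact ⟨fun h => List.cons_prefix_cons.mpr ⟨rfl, h⟩, fun h => (List.cons_prefix_cons.mp h).2⟩
      · rw [if_neg hx]
        constructor
        · intro h; simp only [List.length_cons] at h; omega
        · intro h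
          exact absurd (List.cons_prefix_cons.mp h).1 (fun he => hx he.symm)

theorem pvOuterA_eq (pv : List Int) (bads : List (List Int)) :
    pvOuterA pv bads = bads.any (fun g => pvGood pv g) := by
  induction bads with
  | nil => simp [pvOuterA]
  | cons g rest ih =>
    have hinner : (pvInnerA pv g 0 0 = g.length) ↔ g <+: pv := by
      have := pvInnerA_prefix g [] pv 0
      simpa using this
    simp only [pvOuterA, List.any_cons]
    by_cases hskip : ((g.length : Int) - (pv.length : Int)).natAbs > 2
    · rw [if_pos hskip, ih]
      have hng : pvGood pv g = false := by
        rw [Bool.eq_false_iff]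
        intro h
        simp only [pvGood, Bool.and_eq_true, decide_eq_true_eq] at h
        have := h.1.length_le
        omega
      simp [hng]
    · rw [if_neg hskip]
      by_cases hin : pvInnerA pv g 0 0 = g.length
      · rw [if_pos hin]
        have hg : pvGood pv g = true := by
          simp only [pvGood, Bool.and_eq_true, decide_eq_true_eq]
          refine ⟨hinner.mp hin, ?_⟩
          omega
        simp [hg]
      · rw [if_neg hin, ih]
        have hng : pvGood pv g = false := by
          rw [Bool.eq_false_iff]
          intro h
          simp only [pvGood, Bool.and_eq_true, decide_eq_true_eq] at h
          exact hin (hinner.mpr h.1)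
        simp [hng]

theorem pv_set_any (xs : List (List Int)) (f : List Int → Bool) :
    (PySem.Set.ofList xs).any f = xs.any f := by
  cases hb : xs.any f
  · simp only [List.any_eq_false] at hb ⊢
    intro x hx
    exact hb x ((PySem.Set.mem_ofList _ _).mp hx)
  · simp only [List.any_eq_true] at hb ⊢
    obtain ⟨x, hx, hf⟩ := hb
    exact ⟨x, (PySem.Set.mem_ofList _ _).mpr hx, hf⟩

theorem pv_alt_eq (pv : List Int) (bads : List (List Int)) :
    check_if_in_bad_circuits_alt pv bads = bads.any (fun g => pvGood pv g) := by
  unfold check_if_in_bad_circuits_alt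
  rw [pv_set_any]
  cases hb : bads.any (fun g => pvGood pv g)
  · simp only [List.any_eq_false] at hb ⊢
    intro p hp
    simp only [List.mem_map, List.mem_filter] at hp
    obtain ⟨l, ⟨hl, hl0⟩, hslice⟩ := hp
    simp only [decide_eq_true_eq] at hl0
    -- the slice is pv.take l.toNat
    have htake : p = pv.take l.toNat := by
      have : l = (l.toNat : Int) := by omega
      rw [this] at hslice
      rw [← hslice, PySem.List.slice_to_natCast]
    by_contra hc
    simp only [PySem.Set.contains_eq_listContains, List.contains_eq_mem,
      decide_eq_true_eq, PySem.Set.mem_ofList] at hc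
    have hgood : pvGood pv p = true := by
      simp only [pvGood, Bool.and_eq_true, decide_eq_true_eq]
      subst htake
      refine ⟨List.take_prefix _ _, ?_⟩
      have hlv : l = (pv.length : Int) ∨ l = (pv.length : Int) - 1 ∨ l = (pv.length : Int) - 2 := by
        simpa using hl
      have hlen : (pv.take l.toNat).length = min l.toNat pv.length := by simp
      omega
    exact hb p hc hgood
  · simp only [List.any_eq_true] at hb ⊢
    obtain ⟨g, hg, hgood⟩ := hb
    simp only [pvGood, Bool.and_eq_true, decide_eq_true_eq] at hgood
    obtain ⟨hpre, hlen⟩ := hgood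
    have hgl := hpre.length_le
    refine ⟨PySem.List.slice pv none (some (g.length : Int)), ?_, ?_⟩
    · simp only [List.mem_map, List.mem_filter]
      refine ⟨(g.length : Int), ⟨?_, by simp⟩, rfl⟩
      have : (g.length : Int) = (pv.length : Int) ∨ (g.length : Int) = (pv.length : Int) - 1 ∨
          (g.length : Int) = (pv.length : Int) - 2 := by omega
      simpa using this
    · rw [PySem.List.slice_to_natCast]
      have : pv.take g.length = g := List.prefix_iff_eq_take.mp hpre |>.symm
      simp [this, PySem.Set.contains_eq_listContains, List.contains_eq_mem, PySem.Set.mem_ofList, hg]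

-- ===== VERDICT (by name: the statement is the Claim_ definition above) =====
theorem check_if_in_bad_circuits_spec : Claim_equal_check_if_in_bad_circuits := by
  intro pv bads _
  unfold Spec_check_if_in_bad_circuits check_if_in_bad_circuits
  rw [pvOuterA_eq, pv_alt_eq]
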